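-- pv_equiv track=rewrite | github.com/imhyensuk/secreai | backend/model/model.py | _build_agent_messages
-- ===== SOURCE A (Python) =====
-- def _build_agent_messages(role: str, history: list, new_message: str) -> list:
--     raw_msgs = []
--     MAX_CHARS = 5000
--
--     if len(history) > 0:
--         raw_msgs.append({"role": "user", "content": history[0].get("content", "")})
--
--     recent_history = []
--     current_chars = len(new_message)
--
--     for h in reversed(history[1:]):
--         content = h.get("content", "")
--         if current_chars + len(content) > MAX_CHARS:
--             break
--         recent_history.insert(0, h)
--         current_chars += len(content)
--
--     for h in recent_history:
--         h_type = h.get("type")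
--         h_role = h.get("role", "")
--         content = h.get("content", "")
--
--         if h_type in ["user", "system"]:
--             raw_msgs.append({"role": "user", "content": content})
--         elif h_type == "agent":
--             if h_role == role:
--                 raw_msgs.append({"role": "assistant", "content": content})
--             else:
--                 raw_msgs.append({"role": "user", "content": f"[{h_role} 전문가의 의견]:\n{content}"})
--
--     raw_msgs.append({"role": "user", "content": new_message})
--
--     collapsed_msgs = []
--     for msg in raw_msgs:
--         if not collapsed_msgs:
--             collapsed_msgs.append(msg)
--         elif collapsed_msgs[-1]["role"] == msg["role"]:
--             collapsed_msgs[-1]["content"] += f"\n\n{msg['content']}"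
--         else:
--             collapsed_msgs.append(msg)
--
--     return collapsed_msgs
-- ===== SOURCE B (Python) =====
-- def _build_agent_messages(role: str, history: list, new_message: str) -> list:
--     # Single fused backward pass: walk history[1:] from the end, tracking the char
--     # budget and merging same-role neighbours immediately while building the result
--     # in reverse; no intermediate recent_history / raw_msgs lists, no collapse pass.
--     MAX_CHARS = 5000
--     rev = [("user", new_message)]  # result pairs, in reverse order
--
--     def push(r, c):
--         lr, lc = rev[-1]
--         if lr == r:
--             rev[-1] = (r, c + "\n\n" + lc)
--         else:
--             rev.append((r, c))
--
--     budget = len(new_message)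
--     for h in reversed(history[1:]):
--         c = h.get("content", "")
--         if budget + len(c) > MAX_CHARS:
--             break
--         budget += len(c)
--         t = h.get("type")
--         if t in ("user", "system"):
--             push("user", c)
--         elif t == "agent":
--             r = h.get("role", "")
--             if r == role:
--                 push("assistant", c)
--             else:
--                 push("user", f"[{r} 전문가의 의견]:\n{c}")
--
--     if history:
--         push("user", history[0].get("content", ""))
--
--     return [{"role": r, "content": c} for r, c in reversed(rev)]
-- ===== Notes on version B (the rewrite author's own statement) =====
-- stated objective: alternative
-- what changed: B replaces A's three staged forward passes (budget-select into recent_history, transform into raw_msgs, collapse by mutating the last element) with a single fused backward pass over history[1:] that tracks the budget and merges same-role neighbours immediately while building the result in reverse, then reverses once.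
import Mathlib
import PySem

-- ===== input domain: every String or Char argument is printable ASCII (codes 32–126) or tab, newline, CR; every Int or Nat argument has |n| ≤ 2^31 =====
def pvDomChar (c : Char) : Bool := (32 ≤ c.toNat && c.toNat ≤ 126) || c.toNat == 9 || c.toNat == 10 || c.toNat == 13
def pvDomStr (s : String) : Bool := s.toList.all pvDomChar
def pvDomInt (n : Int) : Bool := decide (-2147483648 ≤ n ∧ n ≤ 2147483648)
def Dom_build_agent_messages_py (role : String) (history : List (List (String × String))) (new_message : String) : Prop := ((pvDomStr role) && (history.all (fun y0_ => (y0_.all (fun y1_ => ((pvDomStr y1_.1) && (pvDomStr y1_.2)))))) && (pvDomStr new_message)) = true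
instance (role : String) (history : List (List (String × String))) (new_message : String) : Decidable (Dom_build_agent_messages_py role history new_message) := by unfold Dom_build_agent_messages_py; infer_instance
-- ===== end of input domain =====

-- B fuses A's three staged forward passes (budget-select, transform, collapse-by-mutating-last)
-- into one backward pass over history[1:] that merges same-role neighbours as it goes,
-- building the result in reverse; same return value, different decomposition.

-- ===== PORT A =====
-- for h in reversed(history[1:]): break on budget overflow, recent_history.insert(0, h)
def pvABudget : List (List (String × String)) → List (List (String × String)) → Int → List (List (String × String))
  | [], recent, _ => recent
  | h :: rest, recent, cc =>
    let content := (PySem.Dict.mk h).getD "content" ""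
    if cc + PySem.Str.len content > 5000 then recent
    else pvABudget rest (h :: recent) (cc + PySem.Str.len content)

-- for h in recent_history: append the role-tagged message dict (other types append nothing)
def pvATrans (role : String) : List (List (String × String)) → List (List (String × String)) → List (List (String × String))
  | [], acc => acc
  | h :: rest, acc =>
    let t := (PySem.Dict.mk h).get? "type"
    let r := (PySem.Dict.mk h).getD "role" ""
    let c := (PySem.Dict.mk h).getD "content" ""
    if t = some "user" ∨ t = some "system" then
      pvATrans role rest (acc ++ [[("role", "user"), ("content", c)]])
    else if t = some "agent" then
      if r = role then pvATrans role rest (acc ++ [[("role", "assistant"), ("content", c)]])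
      else pvATrans role rest (acc ++ [[("role", "user"), ("content", "[" ++ r ++ " 전문가의 의견]:\n" ++ c)]])
    else pvATrans role rest acc

-- the collapse loop; every msg dict built above has the keys "role" and "content", so the
-- raw Python lookups msg["role"], msg["content"] are exactly getD here (never KeyError)
def pvACollapse : List (List (String × String)) → List (List (String × String)) → List (List (String × String))
  | [], acc => acc
  | m :: rest, acc =>
    if acc.isEmpty then pvACollapse rest (acc ++ [m])
    else
      let last := acc.getLast!
      if (PySem.Dict.mk last).getD "role" "" = (PySem.Dict.mk m).getD "role" "" then
        pvACollapse rest (acc.dropLast ++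
          [((PySem.Dict.mk last).insert "content"
              ((PySem.Dict.mk last).getD "content" "" ++ "\n\n" ++ (PySem.Dict.mk m).getD "content" "")).items])
      else pvACollapse rest (acc ++ [m])

def build_agent_messages_py (role : String) (history : List (List (String × String))) (new_message : String) : List (List (String × String)) :=
  -- if len(history) > 0: raw_msgs.append({"role": "user", "content": history[0].get("content","")})
  let raw0 : List (List (String × String)) :=
    match history with
    | [] => []
    | h0 :: _ => [[("role", "user"), ("content", (PySem.Dict.mk h0).getD "content" "")]]
  -- history[1:] with a nonnegative literal index is exactly drop 1
  let recent := pvABudget (history.drop 1).reverse [] (PySem.Str.len new_message)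
  let raw := pvATrans role recent raw0 ++ [[("role", "user"), ("content", new_message)]]
  pvACollapse raw []

-- ===== PORT B =====
-- B's `rev` (Python list, newest message first when read from the END) is kept here
-- head-first, i.e. this Lean list IS Python's rev reversed: Python's rev[-1] is the head,
-- rev.append is cons, mutating rev[-1] rewrites the head, and Python's final
-- `reversed(rev)` is then already done.
def pvBPush (p : String × String) : List (String × String) → List (String × String)
  | (lr, lc) :: rest => if lr = p.1 then (p.1, p.2 ++ "\n\n" ++ lc) :: rest else p :: (lr, lc) :: rest
  | [] => [p]   -- unreachable: rev starts nonempty and never shrinks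

-- for h in reversed(history[1:]): break on overflow, else transform h and push-merge it
def pvBLoop (role : String) : List (List (String × String)) → Int → List (String × String) → List (String × String)
  | [], _, rev => rev
  | h :: rest, budget, rev =>
    let c := (PySem.Dict.mk h).getD "content" ""
    if budget + PySem.Str.len c > 5000 then rev
    else
      let t := (PySem.Dict.mk h).get? "type"
      let rev' :=
        if t = some "user" ∨ t = some "system" then pvBPush ("user", c) rev
        else if t = some "agent" then
          let r := (PySem.Dict.mk h).getD "role" ""
          if r = role then pvBPush ("assistant", c) rev
          else pvBPush ("user", "[" ++ r ++ " 전문가의 의견]:\n" ++ c) rev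
        else rev
      pvBLoop role rest (budget + PySem.Str.len c) rev'

def build_agent_messages_py_alt (role : String) (history : List (List (String × String))) (new_message : String) : List (List (String × String)) :=
  let rev0 : List (String × String) := [("user", new_message)]
  let rev1 := pvBLoop role (history.drop 1).reverse (PySem.Str.len new_message) rev0
  let rev2 :=
    match history with
    | [] => rev1
    | h0 :: _ => pvBPush ("user", (PySem.Dict.mk h0).getD "content" "") rev1
  rev2.map (fun p => [("role", p.1), ("content", p.2)])

-- ===== PRECONDITION & SPEC =====
def Spec_build_agent_messages_py (role : String) (history : List (List (String × String))) (new_message : String) (out : List (List (String × String))) : Prop := out = build_agent_messages_py_alt role history new_message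
instance (role : String) (history : List (List (String × String))) (new_message : String) (out : List (List (String × String))) : Decidable (Spec_build_agent_messages_py role history new_message out) := by unfold Spec_build_agent_messages_py; infer_instance

-- ===== CLAIM (what is proved, stated in full; the proofs are below) =====
def Claim_equal_build_agent_messages_py : Prop := ∀ (role : String) (history : List (List (String × String))) (new_message : String), Dom_build_agent_messages_py role history new_message → Spec_build_agent_messages_py role history new_message (build_agent_messages_py role history new_message)

-- ===== LEMMAS AND PROOFS =====
-- Proof device: both sides are shown equal to the "\n\n"-joined groupby of the same
-- role/content pair list (groups built by right recursion, exactly B's backward absorption).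

-- a (role, content) pair rendered as the message dict both programs return
def pvMkMsg (p : String × String) : List (String × String) := [("role", p.1), ("content", p.2)]

def pvRender (g : String × List String) : String × String := (g.1, PySem.Str.join "\n\n" g.2)

def pvAbsorb (p : String × String) : List (String × List String) → List (String × List String)
  | (r', g) :: gs => if p.1 = r' then (p.1, p.2 :: g) :: gs else (p.1, [p.2]) :: (r', g) :: gs
  | [] => [(p.1, [p.2])]

def pvGroupBy : List (String × String) → List (String × List String)
  | [] => []
  | p :: rest => pvAbsorb p (pvGroupBy rest)

-- pairs produced by transforming one history entry (0 or 1 of them)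
def pvTrans1 (role : String) (h : List (String × String)) : List (String × String) :=
  let t := (PySem.Dict.mk h).get? "type"
  let r := (PySem.Dict.mk h).getD "role" ""
  let c := (PySem.Dict.mk h).getD "content" ""
  if t = some "user" ∨ t = some "system" then [("user", c)]
  else if t = some "agent" then
    if r = role then [("assistant", c)]
    else [("user", "[" ++ r ++ " 전문가의 의견]:\n" ++ c)]
  else []

theorem pvJoin_single (a : String) : PySem.Str.join "\n\n" [a] = a := by
  simp [PySem.Str.join, PySem.Chars.join, List.intercalate]

theorem pvJoin_cons2 (a : String) (l : List String) (h : l ≠ []) :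
    PySem.Str.join "\n\n" (a :: l) = a ++ "\n\n" ++ PySem.Str.join "\n\n" l := by
  obtain ⟨b, t, rfl⟩ := List.exists_cons_of_ne_nil h
  have hsep : "\n\n".toList = ['\n', '\n'] := rfl
  simp only [PySem.Str.join, hsep, List.map_cons, PySem.Chars.join_cons_cons]
  generalize PySem.Chars.join ['\n', '\n'] (b.toList :: List.map String.toList t) = J
  rw [String.ofList_append, String.ofList_append]
  simp

theorem pvJoin_cons (a b : String) (l : List String) :
    PySem.Str.join "\n\n" ((a ++ "\n\n" ++ b) :: l) = PySem.Str.join "\n\n" (a :: b :: l) := by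
  simp [PySem.Str.join, PySem.Chars.join, List.intercalate]
  cases l <;> simp

theorem pvMkMsg_getD_role (p : String × String) :
    (PySem.Dict.mk (pvMkMsg p)).getD "role" "" = p.1 := by
  simp [pvMkMsg, PySem.Dict.getD_eq_get?_getD, PySem.Dict.get?_mk_cons]

theorem pvMkMsg_getD_content (p : String × String) :
    (PySem.Dict.mk (pvMkMsg p)).getD "content" "" = p.2 := by
  simp [pvMkMsg, PySem.Dict.getD_eq_get?_getD, PySem.Dict.get?_mk_cons]

theorem pvMkMsg_insert_content (p : String × String) (v : String) :
    ((PySem.Dict.mk (pvMkMsg p)).insert "content" v).items = pvMkMsg (p.1, v) := by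
  simp [pvMkMsg, PySem.Dict.items_insert]

-- every group pvGroupBy builds is nonempty
theorem pvGroupBy_nonempty (l : List (String × String)) :
    ∀ g ∈ pvGroupBy l, g.2 ≠ [] := by
  induction l with
  | nil => intro g hg; simp [pvGroupBy] at hg
  | cons p rest ih =>
    intro g hg
    simp only [pvGroupBy] at hg
    cases hgs : pvGroupBy rest with
    | nil => rw [hgs] at hg; simp [pvAbsorb] at hg; simp [hg]
    | cons g0 gs =>
      obtain ⟨r', g'⟩ := g0
      rw [hgs] at hg
      by_cases hp : p.1 = r'
      · simp [pvAbsorb, hp] at hg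
        rcases hg with hg | hg
        · simp [hg]
        · exact ih g (by rw [hgs]; exact List.mem_cons_of_mem _ hg)
      · simp [pvAbsorb, hp] at hg
        rcases hg with hg | hg | hg
        · simp [hg]
        · exact ih g (by rw [hgs, hg]; exact List.mem_cons_self)
        · exact ih g (by rw [hgs]; exact List.mem_cons_of_mem _ hg)

-- B's push on the rendered groups is absorb-then-render
theorem pvPush_render (p : String × String) (l : List (String × String)) :
    pvBPush p ((pvGroupBy l).map pvRender) = (pvAbsorb p (pvGroupBy l)).map pvRender := by
  cases hgs : pvGroupBy l with
  | nil => simp [pvBPush, pvAbsorb, pvRender, pvJoin_single]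
  | cons g0 gs =>
    obtain ⟨r', g'⟩ := g0
    have hne : g' ≠ [] := pvGroupBy_nonempty l (r', g') (by rw [hgs]; exact List.mem_cons_self)
    obtain ⟨b, t, rfl⟩ := List.exists_cons_of_ne_nil hne
    by_cases hp : r' = p.1
    · have hjoin := pvJoin_cons2 p.2 (b :: t) (by simp)
      simp [pvBPush, pvAbsorb, pvRender, hp, hjoin]
    · have hp' : ¬ p.1 = r' := fun h => hp h.symm
      simp [pvBPush, pvAbsorb, pvRender, hp, hp', pvJoin_single]

-- accumulator lemmas
theorem pvABudget_acc (l : List (List (String × String))) :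
    ∀ (recent : List (List (String × String))) (cc : Int),
      pvABudget l recent cc = pvABudget l [] cc ++ recent := by
  induction l with
  | nil => intro recent cc; simp [pvABudget]
  | cons h rest ih =>
    intro recent cc
    simp only [pvABudget]
    split
    · simp
    · rw [ih (h :: recent), ih [h]]; simp

-- B's trans as a pure function of the entry list (used to compare with A's pvATrans)
def pvPureTrans (role : String) : List (List (String × String)) → List (String × String)
  | [] => []
  | h :: rest => pvTrans1 role h ++ pvPureTrans role rest

theorem pvATrans_eq (role : String) (hs : List (List (String × String))) :
    ∀ (acc : List (List (String × String))),
      pvATrans role hs acc = acc ++ (pvPureTrans role hs).map pvMkMsg := by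
  induction hs with
  | nil => intro acc; simp [pvATrans, pvPureTrans]
  | cons h rest ih =>
    intro acc
    simp only [pvATrans, pvPureTrans, pvTrans1]
    split
    · rw [ih]; simp [pvMkMsg]
    · split
      · split
        · rw [ih]; simp [pvMkMsg]
        · rw [ih]; simp [pvMkMsg]
      · rw [ih]; simp

-- B's loop computes the rendered groupby of A's (transformed kept list ++ base)
theorem pvBLoop_eq (role : String) (l : List (List (String × String))) :
    ∀ (budget : Int) (q : List (String × String)),
      pvBLoop role l budget ((pvGroupBy q).map pvRender) =
        (pvGroupBy (pvPureTrans role (pvABudget l [] budget) ++ q)).map pvRender := by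
  induction l with
  | nil => intro budget q; simp [pvBLoop, pvABudget, pvPureTrans]
  | cons h rest ih =>
    intro budget q
    simp only [pvBLoop, pvABudget]
    split
    · simp [pvPureTrans]
    · rw [pvABudget_acc]
      have hstep :
          (if (PySem.Dict.mk h).get? "type" = some "user" ∨ (PySem.Dict.mk h).get? "type" = some "system" then
            pvBPush ("user", (PySem.Dict.mk h).getD "content" "") ((pvGroupBy q).map pvRender)
          else if (PySem.Dict.mk h).get? "type" = some "agent" then
            if (PySem.Dict.mk h).getD "role" "" = role then
              pvBPush ("assistant", (PySem.Dict.mk h).getD "content" "") ((pvGroupBy q).map pvRender)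
            else pvBPush ("user", "[" ++ (PySem.Dict.mk h).getD "role" "" ++ " 전문가의 의견]:\n" ++ (PySem.Dict.mk h).getD "content" "") ((pvGroupBy q).map pvRender)
          else (pvGroupBy q).map pvRender)
          = (pvGroupBy (pvTrans1 role h ++ q)).map pvRender := by
        simp only [pvTrans1]
        split
        · simp [pvPush_render, pvGroupBy]
        · split
          · split
            · simp [pvPush_render, pvGroupBy]
            · simp [pvPush_render, pvGroupBy]
          · simp
      rw [hstep, ih]
      have : pvPureTrans role (pvABudget rest [] (budget + PySem.Str.len ((PySem.Dict.mk h).getD "content" "")) ++ [h])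
          = pvPureTrans role (pvABudget rest [] (budget + PySem.Str.len ((PySem.Dict.mk h).getD "content" ""))) ++ pvTrans1 role h := by
        generalize pvABudget rest [] (budget + PySem.Str.len ((PySem.Dict.mk h).getD "content" "")) = k
        induction k with
        | nil => simp [pvPureTrans]
        | cons x xs ihk => simp [pvPureTrans, ihk]
      rw [this, List.append_assoc]

-- A's collapse loop computes the rendered groupby
theorem pvCollapse_main (ps : List (String × String)) :
    ∀ (done : List (String × String)) (p : String × String),
      pvACollapse (ps.map pvMkMsg) (done.map pvMkMsg ++ [pvMkMsg p]) =
        done.map pvMkMsg ++ ((pvAbsorb p (pvGroupBy ps)).map pvRender).map pvMkMsg := by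
  induction ps with
  | nil =>
    intro done p
    simp [pvACollapse, pvGroupBy, pvAbsorb, pvRender, pvJoin_single, pvMkMsg]
  | cons q rest ih =>
    intro done p
    have hne : (done.map pvMkMsg ++ [pvMkMsg p]).isEmpty = false := by simp
    have hlast : (done.map pvMkMsg ++ [pvMkMsg p]).getLast! = pvMkMsg p := by
      simp [List.getLast!_eq_getLast?_getD]
    rw [List.map_cons]
    simp only [pvACollapse, hne, Bool.false_eq_true, if_false, hlast,
      pvMkMsg_getD_role, pvMkMsg_getD_content, List.dropLast_concat]
    by_cases hpq : p.1 = q.1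
    · rw [if_pos hpq, pvMkMsg_insert_content]
      rw [ih done (p.1, p.2 ++ "\n\n" ++ q.2)]
      -- absorb of the merged pair equals absorb p ∘ absorb q, after rendering
      have : (pvAbsorb (p.1, p.2 ++ "\n\n" ++ q.2) (pvGroupBy rest)).map pvRender
          = (pvAbsorb p (pvGroupBy (q :: rest))).map pvRender := by
        simp only [pvGroupBy]
        cases hgs : pvGroupBy rest with
        | nil => simp [pvAbsorb, hpq, pvRender, pvJoin_cons]
        | cons g0 gs =>
          obtain ⟨r', g'⟩ := g0
          by_cases hqr : q.1 = r'
          · simp [pvAbsorb, hpq, hqr, pvRender, pvJoin_cons]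
          · simp [pvAbsorb, hpq, hqr, pvRender, pvJoin_cons]
      rw [this]
    · rw [if_neg hpq]
      have harr : done.map pvMkMsg ++ [pvMkMsg p] ++ [pvMkMsg q]
          = (done ++ [p]).map pvMkMsg ++ [pvMkMsg q] := by simp
      rw [harr, ih (done ++ [p]) q]
      have : pvAbsorb p (pvGroupBy (q :: rest)) = (p.1, [p.2]) :: pvAbsorb q (pvGroupBy rest) := by
        simp only [pvGroupBy]
        cases pvGroupBy rest with
        | nil => simp [pvAbsorb, hpq]
        | cons g0 gs =>
          obtain ⟨r', g'⟩ := g0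
          by_cases hqr : q.1 = r'
          · subst hqr; simp [pvAbsorb, hpq]
          · simp [pvAbsorb, hqr, hpq]
      rw [this]
      simp [pvRender, pvJoin_single, pvMkMsg]

theorem pvCollapse_start (q : String × String) (qs : List (String × String)) :
    pvACollapse ((q :: qs).map pvMkMsg) [] = ((pvGroupBy (q :: qs)).map pvRender).map pvMkMsg := by
  rw [List.map_cons]
  simp only [pvACollapse, List.isEmpty_nil, if_true, List.nil_append]
  have := pvCollapse_main qs [] q
  simp only [List.map_nil, List.nil_append] at this
  rw [this]; rfl

-- A's whole pipeline, as the rendered groupby of (acc ++ trans(kept) ++ [new])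
theorem pvA_as_groupby (role new_message : String) (recent : List (List (String × String))) (acc : List (String × String)) :
    pvACollapse (pvATrans role recent (acc.map pvMkMsg) ++ [[("role", "user"), ("content", new_message)]]) [] =
      ((pvGroupBy (acc ++ pvPureTrans role recent ++ [("user", new_message)])).map pvRender).map pvMkMsg := by
  rw [pvATrans_eq]
  have hnew : ([[("role", "user"), ("content", new_message)]] : List (List (String × String)))
      = [("user", new_message)].map pvMkMsg := by simp [pvMkMsg]
  rw [hnew, ← List.map_append, ← List.map_append]
  obtain ⟨q, qs, hq⟩ := List.exists_cons_of_ne_nil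
    (show acc ++ pvPureTrans role recent ++ [("user", new_message)] ≠ [] from by simp)
  rw [hq, pvCollapse_start]

-- ===== VERDICT (by name: the statement is the Claim_ definition above) =====
theorem build_agent_messages_py_spec : Claim_equal_build_agent_messages_py := by
  intro role history new_message _
  unfold Spec_build_agent_messages_py
  have hbase : ([("user", new_message)] : List (String × String))
      = (pvGroupBy [("user", new_message)]).map pvRender := by
    simp [pvGroupBy, pvAbsorb, pvRender, pvJoin_single]
  cases history with
  | nil =>
    simp only [build_agent_messages_py, build_agent_messages_py_alt]
    rw [hbase, pvBLoop_eq]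
    have := pvA_as_groupby role new_message (pvABudget (([] : List (List (String × String))).drop 1).reverse [] (PySem.Str.len new_message)) []
    simp only [List.map_nil, List.nil_append] at this
    rw [this]
    simp [List.map_map, pvRender, pvMkMsg, Function.comp]
  | cons h0 htl =>
    simp only [build_agent_messages_py, build_agent_messages_py_alt]
    rw [hbase, pvBLoop_eq, pvPush_render]
    have hA := pvA_as_groupby role new_message (pvABudget ((h0 :: htl).drop 1).reverse [] (PySem.Str.len new_message)) [("user", (PySem.Dict.mk h0).getD "content" "")]
    have hacc : ([("user", (PySem.Dict.mk h0).getD "content" "")] : List (String × String)).map pvMkMsg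
        = [[("role", "user"), ("content", (PySem.Dict.mk h0).getD "content" "")]] := by simp [pvMkMsg]
    rw [hacc] at hA
    rw [hA]
    have : pvAbsorb ("user", (PySem.Dict.mk h0).getD "content" "")
        (pvGroupBy (pvPureTrans role (pvABudget ((h0 :: htl).drop 1).reverse [] (PySem.Str.len new_message)) ++ [("user", new_message)]))
        = pvGroupBy ([("user", (PySem.Dict.mk h0).getD "content" "")] ++ pvPureTrans role (pvABudget ((h0 :: htl).drop 1).reverse [] (PySem.Str.len new_message)) ++ [("user", new_message)]) := by
      simp [pvGroupBy]
    rw [this]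
    simp [List.map_map, pvRender, pvMkMsg, Function.comp]
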